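-- pv_equiv track=rewrite | github.com/sam016/artkoL | Tasks/Reverse Hash/ReverseHash.py | string_from_hash
-- ===== SOURCE A (Python) =====
-- letters = "acdegilmnoprstuw"
--
-- def string_from_hash(hash):
--     h = int(hash)
--     result = ""
--     indices = []
--     while h > 7:
--         ind = (h % 37)
--         indices.append(ind)
--         h = int(h / 37)         # int used to convert float values to int
--         # python 2.7 converting a / b = int
--         # python 3.5 converting a / b = float
--         # hence, int to take care of all scenarios
--
--     for ind in indices:
--         result = letters[ind] + result
--
--     return result
-- ===== SOURCE B (Python) =====
-- letters = "acdegilmnoprstuw"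
--
-- def string_from_hash(hash):
--     def go(h):
--         if h <= 7:
--             return ""
--         return go(h // 37) + letters[h % 37]
--     return go(int(hash))
-- ===== Notes on version B (the rewrite author's own statement) =====
-- stated objective: simpler
-- what changed: A's two-pass build (while-loop collecting digit indices into a list, then a second loop prepending letters) is replaced by a single recursive descent that returns go(h // 37) + letters[h % 37], so the intermediate indices list and the reversing pass disappear.
import Mathlib
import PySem

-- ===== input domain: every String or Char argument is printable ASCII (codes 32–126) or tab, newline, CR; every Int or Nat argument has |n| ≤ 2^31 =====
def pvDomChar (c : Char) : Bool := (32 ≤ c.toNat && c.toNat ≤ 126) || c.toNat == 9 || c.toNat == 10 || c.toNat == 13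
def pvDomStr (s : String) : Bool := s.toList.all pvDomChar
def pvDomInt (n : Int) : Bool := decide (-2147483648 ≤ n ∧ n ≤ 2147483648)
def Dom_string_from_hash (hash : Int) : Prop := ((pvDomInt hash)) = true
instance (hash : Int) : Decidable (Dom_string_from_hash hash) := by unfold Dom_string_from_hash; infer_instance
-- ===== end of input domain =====

-- B replaces A's two-pass build (collect digit indices, then prepend letters in a second loop)
-- by a single recursive descent that emits the most-significant letter from the deepest call.

-- ===== PORT A =====
def pvLetters : List Char := "acdegilmnoprstuw".toList

-- A's while-loop: collect h % 37 while h > 7, stepping h = int(h / 37)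
-- (PySem.Int.truncdiv is exactly Python's int(h / 37) for |h| < 2^53).
def pvCollect (h : Int) : List Int :=
  if h > 7 then PySem.Int.mod h 37 :: pvCollect (PySem.Int.truncdiv h 37) else []
termination_by h.toNat
decreasing_by
  simp only [PySem.Int.truncdiv]
  rw [Int.tdiv_eq_ediv_of_nonneg (by omega)]
  omega

-- A's second loop: result = letters[ind] + result, as a cons onto the char list.
-- The .getD ' ' default is unreachable under Pre_ (letters[ind] raises IndexError there).
def string_from_hash (hash : Int) : String :=
  String.ofList ((pvCollect hash).foldl
    (fun result ind => ((PySem.List.pyGet? pvLetters ind).getD ' ') :: result) [])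

-- ===== PORT B =====
-- B's recursive helper go: '' when h <= 7, else go(h // 37) + letters[h % 37].
def pvGoB (h : Int) : List Char :=
  if h ≤ 7 then []
  else pvGoB (PySem.Int.floordiv h 37) ++
    [(PySem.List.pyGet? pvLetters (PySem.Int.mod h 37)).getD ' ']
termination_by h.toNat
decreasing_by
  rw [PySem.Int.floordiv_eq_ediv_of_pos (by omega)]
  omega

def string_from_hash_alt (hash : Int) : String := String.ofList (pvGoB hash)

-- ===== PRECONDITION & SPEC =====
-- Pre_ excludes exactly the inputs on which Python A raises IndexError: those whose
-- quirky base-37 expansion (digits taken while the running quotient exceeds 7)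
-- contains a digit ≥ 16 = len(letters). Within Dom at most 6 digits exist (37^6 > 2^31).
def Pre_string_from_hash (hash : Int) : Prop :=
  ∀ k ∈ List.range 7,
    PySem.Int.floordiv hash (37 ^ k) > 7 →
      PySem.Int.mod (PySem.Int.floordiv hash (37 ^ k)) 37 < 16
instance (hash : Int) : Decidable (Pre_string_from_hash hash) := by
  unfold Pre_string_from_hash; infer_instance

def pvWitness_string_from_hash : Int := (296)

def Spec_string_from_hash (hash : Int) (out : String) : Prop := out = string_from_hash_alt hash
instance (hash : Int) (out : String) : Decidable (Spec_string_from_hash hash out) := by unfold Spec_string_from_hash; infer_instance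

-- ===== CLAIM (what is proved, stated in full; the proofs are below) =====
def Claim_equal_string_from_hash : Prop := ∀ (hash : Int), Dom_string_from_hash hash → Pre_string_from_hash hash → Spec_string_from_hash hash (string_from_hash hash)

-- ===== LEMMAS AND PROOFS =====

-- the letter emitted for one digit index
def pvEmit (ind : Int) : Char := (PySem.List.pyGet? pvLetters ind).getD ' '

lemma pv_foldl_cons (l : List Int) (s : List Char) :
    l.foldl (fun r i => pvEmit i :: r) s = (l.map pvEmit).reverse ++ s := by
  induction l generalizing s with
  | nil => simp
  | cons d rest ih => simp [List.foldl_cons, ih]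

lemma pv_trunc_eq_floor (h : Int) (hh : 7 < h) :
    PySem.Int.truncdiv h 37 = PySem.Int.floordiv h 37 := by
  rw [PySem.Int.truncdiv, Int.tdiv_eq_ediv_of_nonneg (by omega),
    PySem.Int.floordiv_eq_ediv_of_pos (by omega)]

lemma pv_go_eq (h : Int) : pvGoB h = ((pvCollect h).map pvEmit).reverse := by
  induction h using pvGoB.induct with
  | case1 h hle =>
    rw [pvGoB, pvCollect]
    have hng : ¬ h > 7 := by omega
    simp [hle, hng]
  | case2 h hgt ih =>
    rw [pvGoB, pvCollect]
    have h7 : 7 < h := by omega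
    simp only [if_neg hgt, if_pos h7, pv_trunc_eq_floor h h7, List.map_cons,
      List.reverse_cons, ih]
    rfl

theorem pv_main (hash : Int) : string_from_hash hash = string_from_hash_alt hash := by
  unfold string_from_hash string_from_hash_alt
  rw [pv_go_eq]
  have := pv_foldl_cons (pvCollect hash) []
  simp only [pvEmit] at this
  rw [this, List.append_nil]

-- ===== VERDICT (by name: the statement is the Claim_ definition above) =====
theorem string_from_hash_spec : Claim_equal_string_from_hash := by
  intro hash _ _
  unfold Spec_string_from_hash
  exact pv_main hash
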